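-- pv_equiv track=rewrite | github.com/gabrielconstantin02/VulpiSiOi | main.py | numara_piese_in_patrat
-- ===== SOURCE A (Python) =====
-- def numara_piese_in_patrat(listaOi, listaVulpi):
--     """
--     functie care numara cate piese au ajuns in patratul de sus
--     :param listaOi: lista de pozitii pt piesele oi
--     :param listaVulpi: lista de pozitii pt piesele vulpe
--     :return: nr de piese din patratul de sus
--     """
--     nr = 0
--     for x in listaOi:
--         oaie = ((x[0] - Graph.translatie) // Graph.scalare, (x[1] - Graph.translatie) // Graph.scalare)
--         if oaie in Graph.noduri[:6] + Graph.noduri[8:11]: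
--             nr += 1
--     for x in listaVulpi:
--         vulpe = ((x[0] - Graph.translatie) // Graph.scalare, (x[1] - Graph.translatie) // Graph.scalare)
--         if vulpe in Graph.noduri[:6] + Graph.noduri[8:11]:
--             nr += 1
--     return nr
--
-- class Graph:
--     # coordonatele nodurilor ()
--     noduri = [
--         (2, 0),
--         (3, 0),
--         (4, 0),
--         (2, 1),
--         (3, 1),
--         (4, 1),
--         (0, 2),
--         (1, 2),
--         (2, 2),
--         (3, 2),
--         (4, 2),
--         (5, 2),
--         (6, 2),
--         (0, 3),
--         (1, 3),
--         (2, 3),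
--         (3, 3),
--         (4, 3),
--         (5, 3),
--         (6, 3),
--         (0, 4),
--         (1, 4),
--         (2, 4),
--         (3, 4),
--         (4, 4),
--         (5, 4),
--         (6, 4),
--         (2, 5),
--         (3, 5),
--         (4, 5),
--         (2, 6),
--         (3, 6),
--         (4, 6)
--     ]
--     muchii = [(0, 1), (0, 4), (0, 3), (1, 2), (1, 4), (2, 5), (2, 4),
--               (3, 4), (3, 8), (4, 5), (4, 10), (4, 9), (4, 8), (5, 10),
--               (6, 7), (6, 14), (6, 13), (7, 8), (7, 14), (8, 9), (8, 16), (8, 15), (8, 14),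
--               (9, 10), (9, 16), (10, 11), (10, 18), (10, 17), (10, 16), (11, 12), (11, 18), (12, 19), (12, 18),
--               (13, 14), (13, 20), (14, 15), (14, 22), (14, 21), (14, 20), (15, 16), (15, 22), (16, 17),
--               (16, 24), (16, 23), (16, 22), (17, 18), (17, 24), (18, 19), (18, 26), (18, 25), (18, 24), (19, 26),
--               (20, 21), (21, 22), (22, 23), (22, 28), (22, 27), (23, 24), (23, 28), (24, 25), (24, 29), (24, 28),
--               (25, 26),
--               (27, 28), (27, 30), (28, 29), (28, 32), (28, 31), (28, 30), (29, 32),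
--               (30, 31), (31, 32)
--
--               ]
--     scalare = 100
--     translatie = 20
--     razaPct = 9
--     razaPiesa = 15
-- ===== SOURCE B (Python) =====
-- def numara_piese_in_patrat(listaOi, listaVulpi):
--     """Histogram the pieces' grid cells once, then sum the counts of the 9 target cells."""
--     cnt = {}
--     for x in listaOi + listaVulpi:
--         cell = ((x[0] - 20) // 100, (x[1] - 20) // 100)
--         cnt[cell] = cnt.get(cell, 0) + 1
--     return sum(cnt.get((gx, gy), 0) for gx in (2, 3, 4) for gy in (0, 1, 2))
-- ===== Notes on version B (the rewrite author's own statement) =====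
-- stated objective: alternative
-- what changed: Instead of testing each piece against a node list sliced and concatenated per iteration, B builds a histogram (dict) of scaled grid cells in one pass and returns the sum of the counts of the 9 target cells.
import Mathlib
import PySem

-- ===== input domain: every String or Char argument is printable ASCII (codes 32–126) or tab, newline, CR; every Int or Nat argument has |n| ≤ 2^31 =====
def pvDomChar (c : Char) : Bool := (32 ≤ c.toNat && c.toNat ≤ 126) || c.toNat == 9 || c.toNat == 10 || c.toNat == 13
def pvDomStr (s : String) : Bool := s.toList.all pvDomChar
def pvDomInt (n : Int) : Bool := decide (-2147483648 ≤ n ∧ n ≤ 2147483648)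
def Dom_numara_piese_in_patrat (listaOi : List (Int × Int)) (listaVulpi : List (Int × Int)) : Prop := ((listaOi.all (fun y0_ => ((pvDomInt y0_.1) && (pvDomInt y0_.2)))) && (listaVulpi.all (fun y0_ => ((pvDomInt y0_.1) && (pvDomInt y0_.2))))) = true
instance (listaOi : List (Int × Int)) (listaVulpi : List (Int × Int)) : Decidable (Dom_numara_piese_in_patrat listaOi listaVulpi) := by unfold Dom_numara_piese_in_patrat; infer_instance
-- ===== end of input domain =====

-- B builds a histogram of scaled grid cells in one pass and sums the counts of the 9 target
-- cells, instead of testing each piece against a sliced-and-concatenated node list (alternative).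

-- ===== PORT A =====
def grNoduri : List (Int × Int) :=
  [(2, 0), (3, 0), (4, 0), (2, 1), (3, 1), (4, 1), (0, 2), (1, 2), (2, 2), (3, 2), (4, 2),
   (5, 2), (6, 2), (0, 3), (1, 3), (2, 3), (3, 3), (4, 3), (5, 3), (6, 3), (0, 4), (1, 4),
   (2, 4), (3, 4), (4, 4), (5, 4), (6, 4), (2, 5), (3, 5), (4, 5), (2, 6), (3, 6), (4, 6)]

def grScalare : Int := 100
def grTranslatie : Int := 20

def numara_piese_in_patrat (listaOi : List (Int × Int)) (listaVulpi : List (Int × Int)) : Int :=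
  let nr : Int := 0
  let nr := listaOi.foldl (fun nr x =>
    let oaie := (PySem.Int.floordiv (x.1 - grTranslatie) grScalare,
                 PySem.Int.floordiv (x.2 - grTranslatie) grScalare)
    if oaie ∈ PySem.List.slice grNoduri none (some 6) ++ PySem.List.slice grNoduri (some 8) (some 11)
    then nr + 1 else nr) nr
  let nr := listaVulpi.foldl (fun nr x =>
    let vulpe := (PySem.Int.floordiv (x.1 - grTranslatie) grScalare,
                  PySem.Int.floordiv (x.2 - grTranslatie) grScalare)
    if vulpe ∈ PySem.List.slice grNoduri none (some 6) ++ PySem.List.slice grNoduri (some 8) (some 11)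
    then nr + 1 else nr) nr
  nr

-- ===== PORT B =====
def numara_piese_in_patrat_alt (listaOi : List (Int × Int)) (listaVulpi : List (Int × Int)) : Int :=
  let cnt := (listaOi ++ listaVulpi).foldl (fun d x =>
      let cell := (PySem.Int.floordiv (x.1 - 20) 100, PySem.Int.floordiv (x.2 - 20) 100)
      d.insert cell (d.getD cell 0 + 1)) PySem.Dict.empty
  (([(2 : Int), 3, 4].flatMap (fun gx => [(0 : Int), 1, 2].map (fun gy => cnt.getD (gx, gy) 0)))).foldl (fun s v => s + v) 0

-- ===== PRECONDITION & SPEC =====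
def Spec_numara_piese_in_patrat (listaOi : List (Int × Int)) (listaVulpi : List (Int × Int)) (out : Int) : Prop := out = numara_piese_in_patrat_alt listaOi listaVulpi
instance (listaOi : List (Int × Int)) (listaVulpi : List (Int × Int)) (out : Int) : Decidable (Spec_numara_piese_in_patrat listaOi listaVulpi out) := by unfold Spec_numara_piese_in_patrat; infer_instance

-- ===== CLAIM =====
def Claim_equal_numara_piese_in_patrat : Prop := ∀ (listaOi : List (Int × Int)) (listaVulpi : List (Int × Int)), Dom_numara_piese_in_patrat listaOi listaVulpi → Spec_numara_piese_in_patrat listaOi listaVulpi (numara_piese_in_patrat listaOi listaVulpi)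

-- ===== LEMMAS AND PROOFS =====

def pvCell (x : Int × Int) : Int × Int :=
  (PySem.Int.floordiv (x.1 - 20) 100, PySem.Int.floordiv (x.2 - 20) 100)

def pvInRect (p : Int × Int) : Bool := decide (2 ≤ p.1 ∧ p.1 ≤ 4 ∧ 0 ≤ p.2 ∧ p.2 ≤ 2)

-- the 9 target nodes are exactly the rectangle 2 ≤ a ≤ 4, 0 ≤ b ≤ 2
theorem pv_mem_target (a b : Int) :
    ((a, b) ∈ PySem.List.slice grNoduri none (some 6) ++ PySem.List.slice grNoduri (some 8) (some 11))
      ↔ (2 ≤ a ∧ a ≤ 4 ∧ 0 ≤ b ∧ b ≤ 2) := by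
  simp only [grNoduri, PySem.List.slice, List.mem_append]
  constructor
  · intro h
    rcases h with h | h <;> simp_all <;> omega
  · intro h
    simp
    omega

-- A's accumulating fold counts the cells inside the rectangle
theorem pv_foldl_countP (m : List (Int × Int)) :
    ∀ n : Int,
    m.foldl (fun nr x =>
      if (pvCell x) ∈ PySem.List.slice grNoduri none (some 6) ++ PySem.List.slice grNoduri (some 8) (some 11)
      then nr + 1 else nr) n = n + (m.countP (fun x => pvInRect (pvCell x)) : Int) := by
  induction m with
  | nil => intro n; simp
  | cons a m ih =>
    intro n
    have hmem : ((pvCell a) ∈ PySem.List.slice grNoduri none (some 6) ++ PySem.List.slice grNoduri (some 8) (some 11))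
        ↔ pvInRect (pvCell a) = true := by
      rw [show pvCell a = ((pvCell a).1, (pvCell a).2) from rfl, pv_mem_target]
      simp [pvInRect]
    by_cases h : pvInRect (pvCell a) = true
    · simp only [List.foldl_cons, List.countP_cons, if_pos (hmem.mpr h), h, ih]
      push_cast
      ring
    · simp only [List.foldl_cons, List.countP_cons, if_neg (fun hx => h (hmem.mp hx)), ih]
      simp [h]

-- the sum of the 9 cell counts equals the rectangle countP
theorem pv_nine_sum (m : List (Int × Int)) :
    (m.count ((2 : Int), (0 : Int)) : Int) + m.count (2, 1) + m.count (2, 2)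
      + m.count (3, 0) + m.count (3, 1) + m.count (3, 2)
      + m.count (4, 0) + m.count (4, 1) + m.count (4, 2)
      = (m.countP pvInRect : Int) := by
  induction m with
  | nil => simp
  | cons a m ih =>
    rcases a with ⟨x, y⟩
    by_cases h : pvInRect (x, y) = true
    · have hx : (2 ≤ x ∧ x ≤ 4 ∧ 0 ≤ y ∧ y ≤ 2) := by
        simpa [pvInRect] using h
      have hx1 : x = 2 ∨ x = 3 ∨ x = 4 := by omega
      have hy1 : y = 0 ∨ y = 1 ∨ y = 2 := by omega
      simp only [List.count_cons, List.countP_cons, h, if_pos]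
      rcases hx1 with rfl | rfl | rfl <;> rcases hy1 with rfl | rfl | rfl <;>
        simp_all <;> omega
    · have hb : ∀ (c : Int × Int), pvInRect c = true → (((x, y) == c) = false) := by
        intro c hc
        by_cases hxy : (x, y) = c
        · subst hxy; simp_all
        · simp [hxy]
      simp [List.count_cons,
            hb (2,0) (by decide), hb (2,1) (by decide), hb (2,2) (by decide),
            hb (3,0) (by decide), hb (3,1) (by decide), hb (3,2) (by decide),
            hb (4,0) (by decide), hb (4,1) (by decide), hb (4,2) (by decide), h, ih]

-- ===== VERDICT =====
theorem numara_piese_in_patrat_spec : Claim_equal_numara_piese_in_patrat := by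
  intro listaOi listaVulpi _
  unfold Spec_numara_piese_in_patrat numara_piese_in_patrat numara_piese_in_patrat_alt
  have hA : ∀ (m : List (Int × Int)) (n : Int),
      m.foldl (fun nr x =>
        let p := (PySem.Int.floordiv (x.1 - grTranslatie) grScalare,
                  PySem.Int.floordiv (x.2 - grTranslatie) grScalare)
        if p ∈ PySem.List.slice grNoduri none (some 6) ++ PySem.List.slice grNoduri (some 8) (some 11)
        then nr + 1 else nr) n = n + (m.countP (fun x => pvInRect (pvCell x)) : Int) :=
    fun m n => pv_foldl_countP m n
  have hB : ∀ (gx gy : Int),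
      ((listaOi ++ listaVulpi).foldl (fun d x =>
        let cell := (PySem.Int.floordiv (x.1 - 20) 100, PySem.Int.floordiv (x.2 - 20) 100)
        d.insert cell (d.getD cell 0 + 1)) PySem.Dict.empty).getD (gx, gy) 0
      = (((listaOi ++ listaVulpi).map pvCell).count (gx, gy) : Int) := by
    intro gx gy
    have h1 : (listaOi ++ listaVulpi).foldl (fun d x =>
        let cell := (PySem.Int.floordiv (x.1 - 20) 100, PySem.Int.floordiv (x.2 - 20) 100)
        d.insert cell (d.getD cell 0 + 1)) (PySem.Dict.empty : PySem.Dict (Int × Int) Int)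
        = ((listaOi ++ listaVulpi).map pvCell).foldl
            (fun d c => d.insert c (d.getD c 0 + 1)) (PySem.Dict.empty : PySem.Dict (Int × Int) Int) := by
      rw [List.foldl_map]
      rfl
    rw [h1, PySem.Dict.getD_foldl_insert_add_one]
    simp [PySem.Dict.empty, PySem.Dict.getD, PySem.Dict.get?]
  simp only [hA, hB, List.flatMap_cons, List.map_cons, List.map_nil, List.flatMap_nil,
    List.append_nil, List.foldl_cons, List.foldl_nil, List.nil_append, List.cons_append,
    zero_add]
  have hm : ∀ (l : List (Int × Int)),
      (l.countP (fun x => pvInRect (pvCell x)) : Int) = ((l.map pvCell).countP pvInRect : Int) := by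
    intro l
    rw [List.countP_map]
    rfl
  rw [hm, hm, pv_nine_sum ((listaOi ++ listaVulpi).map pvCell), List.map_append,
    List.countP_append]
  push_cast
  ring
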